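-- pv_equiv track=rewrite | github.com/20jastrobel/Holstein_test | src/quantum/hartree_fock_reference_state.py | bitstring_qn1_to_q0
-- ===== SOURCE A (Python) =====
-- from typing import List, Optional, Sequence, Tuple, Union
--
-- def bitstring_qn1_to_q0(n_qubits: int, occupied_qubits: Sequence[int]) -> str:
--     """
--     Return a computational-basis label in q_(n-1)...q_0 order.
--
--     Example (n_qubits=4, occupied=[0,2]) -> "0101" i.e. |q3 q2 q1 q0> = |0 1 0 1>.
--     """
--     if n_qubits <= 0:
--         raise ValueError("n_qubits must be positive")
--     bits = ["0"] * n_qubits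
--     for q in occupied_qubits:
--         if q < 0 or q >= n_qubits:
--             raise ValueError("occupied qubit index out of range")
--         bits[n_qubits - 1 - q] = "1"
--     return "".join(bits)
-- ===== SOURCE B (Python) =====
-- def bitstring_qn1_to_q0(n_qubits, occupied_qubits):
--     if n_qubits <= 0:
--         raise ValueError("n_qubits must be positive")
--     occupied = set()
--     for q in occupied_qubits:
--         if q < 0 or q >= n_qubits:
--             raise ValueError("occupied qubit index out of range")
--         occupied.add(q)
--     return "".join(
--         "1" if (n_qubits - 1 - i) in occupied else "0" for i in range(n_qubits)
--     )
-- ===== Notes on version B (the rewrite author's own statement) =====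
-- stated objective: alternative
-- what changed: A scatters '1's into a preallocated mutable bit array indexed by n-1-q; B instead builds a set of occupied indices (validating eagerly) and gathers the string in one left-to-right pass over all positions with membership tests.
import Mathlib
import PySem

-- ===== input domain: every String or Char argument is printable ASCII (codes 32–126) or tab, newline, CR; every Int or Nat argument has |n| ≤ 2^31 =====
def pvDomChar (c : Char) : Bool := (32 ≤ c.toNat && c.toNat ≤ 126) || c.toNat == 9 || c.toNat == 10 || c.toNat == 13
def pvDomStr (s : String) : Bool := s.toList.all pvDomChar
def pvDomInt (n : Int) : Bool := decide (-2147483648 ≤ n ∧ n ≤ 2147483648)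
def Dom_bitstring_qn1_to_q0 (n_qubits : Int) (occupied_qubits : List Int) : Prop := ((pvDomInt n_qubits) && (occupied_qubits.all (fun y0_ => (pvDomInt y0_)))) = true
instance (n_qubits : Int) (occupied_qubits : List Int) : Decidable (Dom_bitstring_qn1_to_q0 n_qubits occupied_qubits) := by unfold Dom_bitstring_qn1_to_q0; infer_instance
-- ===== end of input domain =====

-- B replaces A's scatter into a mutable bit array by building a set of occupied
-- indices and gathering the string with membership tests; same cost, different structure.

-- ===== PORT A =====
-- A raises ValueError when n_qubits ≤ 0 or an index is out of range; those inputs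
-- are excluded by Pre_ below, and the branches here just skip (unspecified there).
def bitstring_qn1_to_q0 (n_qubits : Int) (occupied_qubits : List Int) : String :=
  if n_qubits ≤ 0 then "" else
  String.ofList (occupied_qubits.foldl
    (fun bits q =>
      if q < 0 ∨ n_qubits ≤ q then bits
      else bits.set (n_qubits - 1 - q).toNat '1')
    (List.replicate n_qubits.toNat '0'))

-- ===== PORT B =====
def bitstring_qn1_to_q0_alt (n_qubits : Int) (occupied_qubits : List Int) : String :=
  if n_qubits ≤ 0 then "" else
  let occupied : PySem.Set Int := occupied_qubits.foldl
    (fun s q => if q < 0 ∨ n_qubits ≤ q then s else PySem.Set.add s q)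
    PySem.Set.empty
  String.ofList ((PySem.List.pyRange 0 n_qubits 1).map
    (fun i => if (n_qubits - 1 - i) ∈ occupied then '1' else '0'))

-- ===== PRECONDITION & SPEC =====
-- Pre_ excludes exactly the inputs where A raises ValueError: n_qubits ≤ 0,
-- or some occupied index outside [0, n_qubits).
def Pre_bitstring_qn1_to_q0 (n_qubits : Int) (occupied_qubits : List Int) : Prop :=
  0 < n_qubits ∧ ∀ q ∈ occupied_qubits, 0 ≤ q ∧ q < n_qubits
instance (n_qubits : Int) (occupied_qubits : List Int) : Decidable (Pre_bitstring_qn1_to_q0 n_qubits occupied_qubits) := by unfold Pre_bitstring_qn1_to_q0; infer_instance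
def pvWitness_bitstring_qn1_to_q0 : Int × List Int := (4, [0, 2])

def Spec_bitstring_qn1_to_q0 (n_qubits : Int) (occupied_qubits : List Int) (out : String) : Prop := out = bitstring_qn1_to_q0_alt n_qubits occupied_qubits
instance (n_qubits : Int) (occupied_qubits : List Int) (out : String) : Decidable (Spec_bitstring_qn1_to_q0 n_qubits occupied_qubits out) := by unfold Spec_bitstring_qn1_to_q0; infer_instance

-- ===== CLAIM (what is proved, stated in full; the proofs are below) =====
def Claim_equal_bitstring_qn1_to_q0 : Prop := ∀ (n_qubits : Int) (occupied_qubits : List Int), Dom_bitstring_qn1_to_q0 n_qubits occupied_qubits → Pre_bitstring_qn1_to_q0 n_qubits occupied_qubits → Spec_bitstring_qn1_to_q0 n_qubits occupied_qubits (bitstring_qn1_to_q0 n_qubits occupied_qubits)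

-- ===== LEMMAS AND PROOFS =====

-- membership in B's set-building fold
theorem memFold (n : Int) (occ : List Int) (s : PySem.Set Int) (x : Int) :
    x ∈ occ.foldl (fun s q => if q < 0 ∨ n ≤ q then s else PySem.Set.add s q) s ↔
      x ∈ s ∨ (x ∈ occ ∧ 0 ≤ x ∧ x < n) := by
  induction occ generalizing s with
  | nil => simp
  | cons q occ ih =>
    simp only [List.foldl_cons, ih]
    split_ifs with h
    · simp only [List.mem_cons]
      constructor
      · tauto
      · rintro (hs | ⟨hq | hq, hx⟩)
        · tauto
        · subst hq; omega
        · tauto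
    · rw [PySem.Set.mem_add]
      simp only [List.mem_cons]
      constructor
      · rintro ((hs | rfl) | h2) <;> [tauto; exact Or.inr ⟨Or.inl rfl, by omega⟩; tauto]
      · tauto

-- pointwise characterisation of A's scatter fold
theorem getFold (n : Int) (occ : List Int) (bits : List Char) (j : Nat)
    (hocc : ∀ q ∈ occ, 0 ≤ q ∧ q < n) (hlen : bits.length = n.toNat) :
    (occ.foldl (fun bits q => if q < 0 ∨ n ≤ q then bits
        else bits.set (n - 1 - q).toNat '1') bits)[j]? =
      if (n - 1 - (j : Int)) ∈ occ then some '1' else bits[j]? := by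
  induction occ generalizing bits with
  | nil => simp
  | cons q occ ih =>
    have hq := hocc q (List.mem_cons_self ..)
    simp only [List.foldl_cons]
    have hguard : ¬ (q < 0 ∨ n ≤ q) := by omega
    rw [if_neg hguard]
    rw [ih _ (fun r hr => hocc r (List.mem_cons_of_mem _ hr)) (by simp [hlen])]
    simp only [List.mem_cons]
    by_cases hmem : (n - 1 - (j : Int)) ∈ occ
    · simp [hmem]
    · simp only [hmem, or_false]
      by_cases heq : n - 1 - (j : Int) = q
      · have hj : (n - 1 - q).toNat = j := by omega
        simp [heq, hj, List.getElem?_set, hlen]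
        omega
      · have hj : (n - 1 - q).toNat ≠ j := by omega
        simp [heq, List.getElem?_set_ne hj]

-- ===== VERDICT (by name: the statement is the Claim_ definition above) =====
theorem bitstring_qn1_to_q0_spec : Claim_equal_bitstring_qn1_to_q0 := by
  intro n occ _ ⟨hn, hocc⟩
  unfold Spec_bitstring_qn1_to_q0 bitstring_qn1_to_q0 bitstring_qn1_to_q0_alt
  rw [if_neg (by omega), if_neg (by omega)]
  congr 1
  apply List.ext_getElem?
  intro j
  rw [getFold n occ _ j hocc (by simp)]
  rw [List.getElem?_map]
  by_cases hj : j < n.toNat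
  · have : (PySem.List.pyRange 0 n 1)[j]? = some ((j : Int)) := by
      rw [PySem.List.getElem?_pyRange_one]
      simp only [zero_add]
      rw [if_pos]
      simp
      omega
    rw [this]
    simp only [Option.map_some]
    simp only [memFold]
    simp only [PySem.Set.empty, List.not_mem_nil, false_or]
    by_cases hmem : (n - 1 - (j : Int)) ∈ occ
    · have := hocc _ hmem
      simp [hmem, this]
      omega
    · simp [hmem, hj]
  · have h1 : (PySem.List.pyRange 0 n 1)[j]? = none := by
      rw [List.getElem?_eq_none]
      rw [PySem.List.length_pyRange_one]; omega
    have hmem : ¬ (n - 1 - (j : Int)) ∈ occ := fun hm => by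
      have := hocc _ hm; omega
    rw [h1]
    simp [hmem]
    omega
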